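-- pv_equiv track=rewrite | github.com/Vovik48rus/CPU-Verilog | InstrToBinTranslator/Debugger/ProgramConsole.py | _mark_line
-- ===== SOURCE A (Python) =====
-- def _mark_line(lines: list[str], index: int) -> list[str]:
--     mark_lines = []
--     for i, line in enumerate(lines):
--         if i == index:
--             mark_lines.append("---> " + line)
--         else:
--             mark_lines.append("     " + line)
--     return mark_lines
-- ===== SOURCE B (Python) =====
-- def _mark_line(lines: list[str], index: int) -> list[str]:
--     if 0 <= index < len(lines):
--         return (["     " + line for line in lines[:index]]
--                 + ["---> " + lines[index]]
--                 + ["     " + line for line in lines[index + 1:]])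
--     return ["     " + line for line in lines]
-- ===== Notes on version B (the rewrite author's own statement) =====
-- stated objective: alternative
-- what changed: Replaces A's single pass with a per-element equality branch by a slice-and-concatenate decomposition: split the list at the marked position and build the result as padded-prefix ++ marked line ++ padded-suffix (uniform padding when the index is out of range), so no element-by-element index comparison is performed.
import Mathlib
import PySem

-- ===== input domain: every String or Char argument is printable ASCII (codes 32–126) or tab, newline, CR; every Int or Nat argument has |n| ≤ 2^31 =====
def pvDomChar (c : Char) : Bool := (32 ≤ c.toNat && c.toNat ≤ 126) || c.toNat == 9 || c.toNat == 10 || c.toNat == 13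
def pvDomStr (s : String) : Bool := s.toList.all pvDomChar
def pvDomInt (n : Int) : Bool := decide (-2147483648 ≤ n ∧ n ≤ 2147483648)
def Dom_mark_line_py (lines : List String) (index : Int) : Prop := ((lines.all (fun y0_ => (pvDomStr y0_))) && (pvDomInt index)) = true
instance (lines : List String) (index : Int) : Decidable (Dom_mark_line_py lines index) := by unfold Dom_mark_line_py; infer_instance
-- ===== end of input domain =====

-- B replaces A's per-element equality branch with a slice-and-concatenate decomposition:
-- padded prefix ++ marked line ++ padded suffix when the index is in range, uniform padding otherwise (objective: alternative).


-- ===== PORT A =====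
-- Port of A: accumulator loop over enumerate(lines), branching on i == index per element.
def mark_line_py (lines : List String) (index : Int) : List String :=
  (PySem.List.enumerate lines).foldl
    (fun mark_lines p =>
      if p.1 = index then mark_lines ++ ["---> " ++ p.2]
      else mark_lines ++ ["     " ++ p.2])
    []

-- ===== PORT B =====
-- Port of B: split at the marked position via slices; padded prefix ++ marked line ++ padded suffix.
def mark_line_py_alt (lines : List String) (index : Int) : List String :=
  if 0 ≤ index ∧ index < lines.length then
    (PySem.List.slice lines none (some index)).map (fun line => "     " ++ line)
    ++ ["---> " ++ lines.getD index.toNat ""]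
    ++ (PySem.List.slice lines (some (index + 1)) none).map (fun line => "     " ++ line)
  else lines.map (fun line => "     " ++ line)

-- ===== PRECONDITION & SPEC =====
def Spec_mark_line_py (lines : List String) (index : Int) (out : List String) : Prop := out = mark_line_py_alt lines index
instance (lines : List String) (index : Int) (out : List String) : Decidable (Spec_mark_line_py lines index out) := by unfold Spec_mark_line_py; infer_instance

-- ===== CLAIM (what is proved, stated in full; the proofs are below) =====
def Claim_equal_mark_line_py : Prop := ∀ (lines : List String) (index : Int), Dom_mark_line_py lines index → Spec_mark_line_py lines index (mark_line_py lines index)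

-- ===== LEMMAS AND PROOFS =====

-- foldl with snoc = map over enumerate
theorem mark_foldl_eq_map (index : Int) (xs : List (Int × String)) (acc : List String) :
    xs.foldl (fun mark_lines p =>
      if p.1 = index then mark_lines ++ ["---> " ++ p.2]
      else mark_lines ++ ["     " ++ p.2]) acc
    = acc ++ xs.map (fun p => if p.1 = index then "---> " ++ p.2 else "     " ++ p.2) := by
  induction xs generalizing acc with
  | nil => simp
  | cons x xs ih =>
    simp only [List.foldl_cons, List.map_cons]
    by_cases h : x.1 = index <;> simp [h, ih, List.append_assoc]

-- when index never occurs among the enumeration indices, the branch never fires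
theorem mark_map_no_match (index : Int) (xs : List String) (s : Int)
    (h : index < s ∨ s + xs.length ≤ index) :
    (PySem.List.enumerate xs s).map
      (fun p => if p.1 = index then "---> " ++ p.2 else "     " ++ p.2)
    = xs.map (fun line => "     " ++ line) := by
  induction xs generalizing s with
  | nil => simp [PySem.List.enumerate_nil]
  | cons x xs ih =>
    rw [PySem.List.enumerate_cons, List.map_cons, List.map_cons]
    have hs : ¬ (s = index) := by
      rcases h with h | h
      · omega
      · simp only [List.length_cons] at h; push_cast at h; omega
    rw [if_neg hs, ih (s + 1) (by
      rcases h with h | h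
      · left; omega
      · right; simp only [List.length_cons] at h; push_cast at h ⊢; omega)]

theorem mark_line_py_eq (lines : List String) (index : Int) :
    mark_line_py lines index = mark_line_py_alt lines index := by
  unfold mark_line_py mark_line_py_alt
  rw [mark_foldl_eq_map, List.nil_append]
  by_cases hr : 0 ≤ index ∧ index < lines.length
  · rw [if_pos hr]
    obtain ⟨h0, hlt⟩ := hr
    set n : Nat := index.toNat with hn
    have hidx : (n : Int) = index := Int.toNat_of_nonneg h0
    have hnlt : n < lines.length := by omega
    -- split lines at position n
    have hsplit : lines = lines.take n ++ lines[n] :: lines.drop (n + 1) := by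
      conv_lhs => rw [← List.take_append_drop n lines, List.drop_eq_getElem_cons hnlt]
    rw [← hidx, PySem.List.slice_to_natCast]
    have h1 : (n : Int) + 1 = ((n + 1 : Nat) : Int) := by push_cast; ring
    rw [h1, PySem.List.slice_from_natCast]
    conv_lhs => rw [hsplit]
    rw [PySem.List.enumerate_append, List.map_append, PySem.List.enumerate_cons,
        List.map_cons]
    have hlen : ((lines.take n).length : Int) = n := by
      simp [List.length_take, Nat.min_eq_left (Nat.le_of_lt hnlt)]
    rw [mark_map_no_match (n : Int) (lines.take n) 0 (by right; rw [hlen]; omega)]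
    rw [mark_map_no_match (n : Int) (lines.drop (n+1)) (0 + ((lines.take n).length : Int) + 1)
        (by left; rw [hlen]; omega)]
    simp [Nat.le_of_lt hnlt, List.getD, List.getElem?_eq_getElem hnlt]
  · rw [if_neg hr]
    push Not at hr
    by_cases h0 : 0 ≤ index
    · exact mark_map_no_match index lines 0 (Or.inr (by simpa using hr h0))
    · exact mark_map_no_match index lines 0 (Or.inl (by omega))

-- ===== VERDICT (by name: the statement is the Claim_ definition above) =====
theorem mark_line_py_spec : Claim_equal_mark_line_py := by
  intro lines index _
  exact mark_line_py_eq lines index
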